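-- pv_equiv track=rewrite | github.com/qianxiHe147/C2RM | pair_construction_confidence_only.py | count_model_combinations
-- ===== SOURCE A (Python) =====
-- from typing import Dict, List, Tuple, Any, Set, Optional
--
-- def count_model_combinations(source_list: List[str]) -> Dict[str, int]:
--     """
--     Count the occurrences of model combinations in source list.
--
--     Args:
--         source_list: List of model source combinations (e.g., ["llama-qwen", "mistral-llama"])
--
--     Returns:
--         Dictionary with counts for each combination type
--     """
--     # Initialize counters
--     combinations = {
--         "llama-qwen": 0, "qwen-llama": 0,
--         "llama-mistral": 0, "mistral-llama": 0,
--         "qwen-mistral": 0, "mistral-qwen": 0,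
--         "other": 0
--     }
--
--     # Count occurrences
--     for source in source_list:
--         if source in combinations:
--             combinations[source] += 1
--         else:
--             combinations["other"] += 1
--
--     # Group bidirectional combinations (e.g., llama-qwen and qwen-llama)
--     simplified = {
--         "llama-qwen": combinations["llama-qwen"] + combinations["qwen-llama"],
--         "llama-mistral": combinations["llama-mistral"] + combinations["mistral-llama"],
--         "qwen-mistral": combinations["qwen-mistral"] + combinations["mistral-qwen"],
--         "other": combinations["other"]
--     }
--
--     return simplified
-- ===== SOURCE B (Python) =====
-- def count_model_combinations(source_list):
--     lq = source_list.count("llama-qwen") + source_list.count("qwen-llama")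
--     lm = source_list.count("llama-mistral") + source_list.count("mistral-llama")
--     qm = source_list.count("qwen-mistral") + source_list.count("mistral-qwen")
--     return {
--         "llama-qwen": lq,
--         "llama-mistral": lm,
--         "qwen-mistral": qm,
--         "other": len(source_list) - lq - lm - qm,
--     }
-- ===== Notes on version B (the rewrite author's own statement) =====
-- stated objective: simpler
-- what changed: Replaced A's per-item counter loop over a seven-bucket dict followed by a bidirectional-pair merge with no explicit loop at all: six list.count calls give the three merged pair counts directly, and 'other' is computed as len(source_list) minus their sum.
import Mathlib
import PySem

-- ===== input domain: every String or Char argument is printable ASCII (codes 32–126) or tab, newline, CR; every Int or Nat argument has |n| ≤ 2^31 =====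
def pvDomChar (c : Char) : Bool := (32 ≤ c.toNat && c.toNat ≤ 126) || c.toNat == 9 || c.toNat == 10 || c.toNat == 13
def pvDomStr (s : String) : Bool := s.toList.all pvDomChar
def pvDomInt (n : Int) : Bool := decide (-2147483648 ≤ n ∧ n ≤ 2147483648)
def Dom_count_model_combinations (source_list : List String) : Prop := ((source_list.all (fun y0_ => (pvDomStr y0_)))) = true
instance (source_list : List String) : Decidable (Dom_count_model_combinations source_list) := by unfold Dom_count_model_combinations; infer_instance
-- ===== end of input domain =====

-- B replaces A's per-item seven-bucket counter loop + merge step by six list.count calls and a length complement for "other" (objective: simpler).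

-- ===== PORT A =====
def count_model_combinations (source_list : List String) : List (String × Int) :=
  let combinations : PySem.Dict String Int :=
    PySem.Dict.ofList [("llama-qwen", 0), ("qwen-llama", 0), ("llama-mistral", 0),
      ("mistral-llama", 0), ("qwen-mistral", 0), ("mistral-qwen", 0), ("other", 0)]
  let c := source_list.foldl
    (fun d source =>
      if d.contains source then d.modify source 0 (· + 1)
      else d.modify "other" 0 (· + 1)) combinations
  -- the 'simplified' dict literal, returned as an association list (its four keys are distinct)
  [("llama-qwen", c.getD "llama-qwen" 0 + c.getD "qwen-llama" 0),
   ("llama-mistral", c.getD "llama-mistral" 0 + c.getD "mistral-llama" 0),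
   ("qwen-mistral", c.getD "qwen-mistral" 0 + c.getD "mistral-qwen" 0),
   ("other", c.getD "other" 0)]

-- ===== PORT B =====
def count_model_combinations_alt (source_list : List String) : List (String × Int) :=
  let lq : Int := (PySem.List.count source_list "llama-qwen" : Int)
      + (PySem.List.count source_list "qwen-llama" : Int)
  let lm : Int := (PySem.List.count source_list "llama-mistral" : Int)
      + (PySem.List.count source_list "mistral-llama" : Int)
  let qm : Int := (PySem.List.count source_list "qwen-mistral" : Int)
      + (PySem.List.count source_list "mistral-qwen" : Int)
  [("llama-qwen", lq), ("llama-mistral", lm), ("qwen-mistral", qm),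
   ("other", (source_list.length : Int) - lq - lm - qm)]

-- ===== PRECONDITION & SPEC =====
def Spec_count_model_combinations (source_list : List String) (out : List (String × Int)) : Prop := out = count_model_combinations_alt source_list
instance (source_list : List String) (out : List (String × Int)) : Decidable (Spec_count_model_combinations source_list out) := by unfold Spec_count_model_combinations; infer_instance

-- ===== CLAIM (what is proved, stated in full; the proofs are below) =====
def Claim_equal_count_model_combinations : Prop := ∀ (source_list : List String), Dom_count_model_combinations source_list → Spec_count_model_combinations source_list (count_model_combinations source_list)

-- ===== LEMMAS AND PROOFS =====

-- A's effective bucket for a source string: itself if it is one of the seven dict keys, else "other"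
def keyA (s : String) : String :=
  if s ∈ ["llama-qwen", "qwen-llama", "llama-mistral", "mistral-llama",
          "qwen-mistral", "mistral-qwen", "other"] then s else "other"

-- A's loop is the keyA-keyed modify loop
lemma foldA_eq (l : List String) :
    ∀ d : PySem.Dict String Int,
      d.keys = ["llama-qwen", "qwen-llama", "llama-mistral", "mistral-llama",
                "qwen-mistral", "mistral-qwen", "other"] →
      l.foldl (fun d source =>
          if d.contains source then d.modify source 0 (· + 1)
          else d.modify "other" 0 (· + 1)) d
        = l.foldl (fun d s => d.modify (keyA s) 0 (· + 1)) d := by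
  induction l with
  | nil => intro d hd; rfl
  | cons s t ih =>
    intro d hd
    have hcont : d.contains s
        = decide (s ∈ ["llama-qwen", "qwen-llama", "llama-mistral", "mistral-llama",
                       "qwen-mistral", "mistral-qwen", "other"]) := by
      rw [PySem.Dict.contains_eq_decide_mem_keys, hd]
    have hstep : (if d.contains s then d.modify s 0 (· + 1) else d.modify "other" 0 (· + 1))
        = d.modify (keyA s) 0 (· + 1) := by
      unfold keyA
      by_cases hm : s ∈ ["llama-qwen", "qwen-llama", "llama-mistral", "mistral-llama",
                         "qwen-mistral", "mistral-qwen", "other"] <;> simp [hcont, hm]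
    have hkeys : (d.modify (keyA s) 0 (· + 1)).keys
        = ["llama-qwen", "qwen-llama", "llama-mistral", "mistral-llama",
           "qwen-mistral", "mistral-qwen", "other"] := by
      have hc : d.contains (keyA s) = true := by
        rw [PySem.Dict.contains_eq_decide_mem_keys, hd]
        unfold keyA; split_ifs with h
        · simpa using h
        · decide
      rw [PySem.Dict.keys_modify, PySem.Dict.keys_insert_of_contains _ _ hc, hd]
    simp only [List.foldl_cons, hstep]
    exact ih _ hkeys

-- A's initial counter dict holds 0 at every key
lemma getD0_init7 (v : String) :
    (PySem.Dict.ofList [("llama-qwen", (0:Int)), ("qwen-llama", 0), ("llama-mistral", 0),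
      ("mistral-llama", 0), ("qwen-mistral", 0), ("mistral-qwen", 0), ("other", 0)]).getD v 0 = 0 := by
  by_cases h1 : v = "llama-qwen"; · subst h1; decide
  by_cases h2 : v = "qwen-llama"; · subst h2; decide
  by_cases h3 : v = "llama-mistral"; · subst h3; decide
  by_cases h4 : v = "mistral-llama"; · subst h4; decide
  by_cases h5 : v = "qwen-mistral"; · subst h5; decide
  by_cases h6 : v = "mistral-qwen"; · subst h6; decide
  by_cases h7 : v = "other"; · subst h7; decide
  apply PySem.Dict.getD_of_not_contains
  rw [PySem.Dict.contains_eq_decide_mem_keys]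
  have hk : (PySem.Dict.ofList [("llama-qwen", (0:Int)), ("qwen-llama", 0), ("llama-mistral", 0),
      ("mistral-llama", 0), ("qwen-mistral", 0), ("mistral-qwen", 0), ("other", 0)]).keys
      = ["llama-qwen", "qwen-llama", "llama-mistral", "mistral-llama",
         "qwen-mistral", "mistral-qwen", "other"] := by decide
  rw [hk]; simp [h1, h2, h3, h4, h5, h6, h7]

-- counts of A's bucket stream vs counts of the raw list
lemma counts_rel (l : List String) :
    ((l.map keyA).count "llama-qwen" = l.count "llama-qwen")
  ∧ ((l.map keyA).count "qwen-llama" = l.count "qwen-llama")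
  ∧ ((l.map keyA).count "llama-mistral" = l.count "llama-mistral")
  ∧ ((l.map keyA).count "mistral-llama" = l.count "mistral-llama")
  ∧ ((l.map keyA).count "qwen-mistral" = l.count "qwen-mistral")
  ∧ ((l.map keyA).count "mistral-qwen" = l.count "mistral-qwen")
  ∧ ((l.map keyA).count "other"
      + l.count "llama-qwen" + l.count "qwen-llama"
      + l.count "llama-mistral" + l.count "mistral-llama"
      + l.count "qwen-mistral" + l.count "mistral-qwen" = l.length) := by
  induction l with
  | nil => simp
  | cons s t ih =>
    obtain ⟨i1, i2, i3, i4, i5, i6, i7⟩ := ih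
    simp only [List.map_cons, List.count_cons, List.length_cons]
    by_cases h1 : s = "llama-qwen"; · subst h1; simp [keyA]; omega
    by_cases h2 : s = "qwen-llama"; · subst h2; simp [keyA]; omega
    by_cases h3 : s = "llama-mistral"; · subst h3; simp [keyA]; omega
    by_cases h4 : s = "mistral-llama"; · subst h4; simp [keyA]; omega
    by_cases h5 : s = "qwen-mistral"; · subst h5; simp [keyA]; omega
    by_cases h6 : s = "mistral-qwen"; · subst h6; simp [keyA]; omega
    by_cases h7 : s = "other"; · subst h7; simp [keyA]; omega
    have hA : keyA s = "other" := by simp [keyA, h1, h2, h3, h4, h5, h6, h7]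
    simp [hA, h1, h2, h3, h4, h5, h6]; omega

-- ===== VERDICT (by name: the statement is the Claim_ definition above) =====
theorem count_model_combinations_spec : Claim_equal_count_model_combinations := by
  intro l _
  unfold Spec_count_model_combinations count_model_combinations count_model_combinations_alt
  dsimp only
  rw [foldA_eq l _ (by decide)]
  have hA : ∀ v, (l.foldl (fun d s => d.modify (keyA s) 0 (· + 1))
      (PySem.Dict.ofList [("llama-qwen", (0:Int)), ("qwen-llama", 0), ("llama-mistral", 0),
        ("mistral-llama", 0), ("qwen-mistral", 0), ("mistral-qwen", 0), ("other", 0)])).getD v 0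
      = ((l.map keyA).count v : Int) := by
    intro v
    have h : l.foldl (fun d s => d.modify (keyA s) 0 (· + 1))
        (PySem.Dict.ofList [("llama-qwen", (0:Int)), ("qwen-llama", 0), ("llama-mistral", 0),
          ("mistral-llama", 0), ("qwen-mistral", 0), ("mistral-qwen", 0), ("other", 0)])
        = (l.map keyA).foldl (fun d x => d.modify x 0 (· + 1))
        (PySem.Dict.ofList [("llama-qwen", (0:Int)), ("qwen-llama", 0), ("llama-mistral", 0),
          ("mistral-llama", 0), ("qwen-mistral", 0), ("mistral-qwen", 0), ("other", 0)]) := by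
      rw [List.foldl_map]
    rw [h, PySem.Dict.getD_foldl_modify_add_one, getD0_init7, zero_add]
  obtain ⟨e1, e2, e3, e4, e5, e6, e7⟩ := counts_rel l
  simp only [hA, PySem.List.count_eq, List.cons.injEq, Prod.mk.injEq, and_true, true_and,
    e1, e2, e3, e4, e5, e6]
  omega
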